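-- pv_equiv track=rewrite | github.com/YoussefMP/CandidateGeneration | Code/FileIOManager.py | annotate_text
-- ===== SOURCE A (Python) =====
-- M_TAG_LENGTH = 9
--
-- ENT_START_TAG = "[m]"
--
-- ENT_END_TAG = "[/m]"
--
-- def annotate_text(text, mentions):
--     # sort mention in the order they appear in the text
--     mentions.sort(key=lambda tup: tup[1])  # sorts in place
--     mentions_annotated = 0
--
--     s_tag = ENT_START_TAG
--     e_tag = ENT_END_TAG
--
--     for span in mentions:
--         # Annotating mention with tags in the text
--         start_id = (mentions_annotated * M_TAG_LENGTH) + span[0]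
--         end_id = (mentions_annotated * M_TAG_LENGTH) + span[1]
--
--         if start_id == 0:
--             text = f'{s_tag} ' + text[0: end_id] + f' {e_tag}' + text[end_id:]
--         else:
--             if text[start_id - 1: end_id].startswith('('):
--                 text = text[0: start_id] + f' {s_tag}' + text[start_id: end_id] + f' {e_tag}' + text[end_id:]
--             else:
--                 text = text[0: start_id - 1] + f' {s_tag}' + text[start_id - 1: end_id] + f' {e_tag}' + text[end_id:]
--
--         mentions_annotated += 1
--     return text
-- ===== SOURCE B (Python) =====
-- ENT_START_TAG = "[m]"
-- ENT_END_TAG = "[/m]"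
--
-- def _tag_one(text, a, b):
--     # one unified construction: a cut point and a start-tag string instead of three copies
--     if a == 0:
--         cut, stag = 0, ENT_START_TAG + " "
--     elif text[a - 1:b].startswith("("):
--         cut, stag = a, " " + ENT_START_TAG
--     else:
--         cut, stag = a - 1, " " + ENT_START_TAG
--     return text[:cut] + stag + text[cut:b] + " " + ENT_END_TAG + text[b:]
--
-- def _tag_all(text, spans):
--     # recursion over pre-shifted spans instead of a loop with a running counter
--     if not spans:
--         return text
--     (a, b) = spans[0]
--     return _tag_all(_tag_one(text, a, b), spans[1:])
--
-- def annotate_text(text, mentions):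
--     mentions.sort(key=lambda tup: tup[1])  # same in-place sort (observable side effect) as the original
--     spans = [(9 * k + s, 9 * k + e) for k, (s, e) in enumerate(mentions)]
--     return _tag_all(text, spans)
-- ===== Notes on version B (the rewrite author's own statement) =====
-- stated objective: alternative
-- what changed: Replaced the loop carrying a mentions_annotated counter and three full copies of the string rebuild with spans pre-shifted once via enumerate, a recursion over them, and one unified cut-point/tag construction per mention; trades the counter state for precomputed indices at the same cost; both still sort mentions in place.
import Mathlib
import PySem

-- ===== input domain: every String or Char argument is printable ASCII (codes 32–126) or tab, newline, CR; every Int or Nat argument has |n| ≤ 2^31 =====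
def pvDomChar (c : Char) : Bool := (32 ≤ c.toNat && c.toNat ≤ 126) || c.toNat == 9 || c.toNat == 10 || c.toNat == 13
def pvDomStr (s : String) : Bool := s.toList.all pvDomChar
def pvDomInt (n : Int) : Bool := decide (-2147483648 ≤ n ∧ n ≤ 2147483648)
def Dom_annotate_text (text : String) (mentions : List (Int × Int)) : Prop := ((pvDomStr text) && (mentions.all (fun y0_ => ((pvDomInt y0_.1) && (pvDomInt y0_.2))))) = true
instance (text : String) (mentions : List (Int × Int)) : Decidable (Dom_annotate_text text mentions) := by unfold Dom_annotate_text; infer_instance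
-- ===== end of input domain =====

-- B replaces A's counter-carrying loop by pre-shifted spans (enumerate) and a recursion with one
-- unified insertion formula; objective: alternative decomposition, same cost. Both sort `mentions` in place (return
-- value equivalence is what is proved; B performs the same in-place sort).

-- ===== PORT A =====
def M_TAG_LENGTH : Int := 9
def ENT_START_TAG : List Char := "[m]".toList
def ENT_END_TAG : List Char := "[/m]".toList

-- one iteration of A's for-loop; state = (text, mentions_annotated)
def annotateStepA (st : List Char × Int) (span : Int × Int) : List Char × Int :=
  let text := st.1
  let start_id := st.2 * M_TAG_LENGTH + span.1
  let end_id := st.2 * M_TAG_LENGTH + span.2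
  let text' :=
    if start_id = 0 then
      (ENT_START_TAG ++ [' ']) ++ PySem.Chars.slice text (some 0) (some end_id) ++
        ([' '] ++ ENT_END_TAG) ++ PySem.Chars.slice text (some end_id) none
    else if PySem.Chars.startswith (PySem.Chars.slice text (some (start_id - 1)) (some end_id)) ['('] then
      PySem.Chars.slice text (some 0) (some start_id) ++ ([' '] ++ ENT_START_TAG) ++
        PySem.Chars.slice text (some start_id) (some end_id) ++
        ([' '] ++ ENT_END_TAG) ++ PySem.Chars.slice text (some end_id) none
    else
      PySem.Chars.slice text (some 0) (some (start_id - 1)) ++ ([' '] ++ ENT_START_TAG) ++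
        PySem.Chars.slice text (some (start_id - 1)) (some end_id) ++
        ([' '] ++ ENT_END_TAG) ++ PySem.Chars.slice text (some end_id) none
  (text', st.2 + 1)

def annotate_text (text : String) (mentions : List (Int × Int)) : String :=
  String.ofList
    (((PySem.List.sorted mentions (fun tup => tup.2)).foldl annotateStepA (text.toList, 0)).1)

-- ===== PORT B =====
-- B's _tag_one: a cut point and a start tag, one construction
def tagOneB (text : List Char) (a b : Int) : List Char :=
  let cs :=
    if a = 0 then ((0 : Int), ENT_START_TAG ++ [' '])
    else if PySem.Chars.startswith (PySem.Chars.slice text (some (a - 1)) (some b)) ['('] then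
      (a, [' '] ++ ENT_START_TAG)
    else (a - 1, [' '] ++ ENT_START_TAG)
  PySem.Chars.slice text none (some cs.1) ++ cs.2 ++
    PySem.Chars.slice text (some cs.1) (some b) ++ ([' '] ++ ENT_END_TAG) ++
    PySem.Chars.slice text (some b) none

-- B's _tag_all: recursion over the pre-shifted spans
def tagAllB (text : List Char) : List (Int × Int) → List Char
  | [] => text
  | (a, b) :: rest => tagAllB (tagOneB text a b) rest

def annotate_text_alt (text : String) (mentions : List (Int × Int)) : String :=
  let ms := PySem.List.sorted mentions (fun tup => tup.2)
  let spans := (PySem.List.enumerate ms 0).map (fun p => (9 * p.1 + p.2.1, 9 * p.1 + p.2.2))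
  String.ofList (tagAllB text.toList spans)

-- ===== PRECONDITION & SPEC =====
def Spec_annotate_text (text : String) (mentions : List (Int × Int)) (out : String) : Prop := out = annotate_text_alt text mentions
instance (text : String) (mentions : List (Int × Int)) (out : String) : Decidable (Spec_annotate_text text mentions out) := by unfold Spec_annotate_text; infer_instance

-- ===== CLAIM (what is proved, stated in full; the proofs are below) =====
def Claim_equal_annotate_text : Prop := ∀ (text : String) (mentions : List (Int × Int)), Dom_annotate_text text mentions → Spec_annotate_text text mentions (annotate_text text mentions)

-- ===== LEMMAS AND PROOFS =====

-- one step of A's loop produces exactly B's unified construction at the shifted indices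
lemma step_eq (text : List Char) (k : Int) (span : Int × Int) :
    annotateStepA (text, k) span = (tagOneB text (9 * k + span.1) (9 * k + span.2), k + 1) := by
  simp only [annotateStepA, tagOneB, M_TAG_LENGTH, mul_comm k 9]
  split_ifs with h1 h2
  · simp [PySem.List.slice_to, List.append_assoc]
  · simp [List.append_assoc]
  · simp [List.append_assoc]

-- A's foldl with counter k equals B's recursion over spans shifted from start k
lemma loop_eq (ms : List (Int × Int)) (text : List Char) (k : Int) :
    (ms.foldl annotateStepA (text, k)).1 =
      tagAllB text ((PySem.List.enumerate ms k).map (fun p => (9 * p.1 + p.2.1, 9 * p.1 + p.2.2))) := by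
  induction ms generalizing text k with
  | nil => simp [tagAllB]
  | cons hd tl ih =>
      simp only [List.foldl_cons, PySem.List.enumerate_cons, List.map_cons, step_eq, tagAllB]
      exact ih _ _

-- ===== VERDICT (by name: the statement is the Claim_ definition above) =====
theorem annotate_text_spec : Claim_equal_annotate_text := by
  intro text mentions _
  unfold Spec_annotate_text annotate_text annotate_text_alt
  rw [loop_eq]
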